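-- pv_equiv track=rewrite | github.com/malbarbo/spython | compiler/tests/integration/level3/negatives_first.py | negatives_first
-- ===== SOURCE A (Python) =====
-- def negatives_first(lst: list[int]) -> list[int]:
--     '''
--     Returns a new list with negatives first, then zeros, then positives.
--
--     Examples
--     >>> negatives_first([])
--     []
--     >>> negatives_first([3, 0, -1, 0, 4])
--     [-1, 0, 0, 3, 4]
--     '''
--     negatives = []
--     zeros = []
--     positives = []
--     for n in lst:
--         if n < 0:
--             negatives.append(n)
--         elif n == 0:
--             zeros.append(n)
--         else:
--             positives.append(n)
--     return negatives + zeros + positives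
-- ===== SOURCE B (Python) =====
-- def negatives_first(lst: list[int]) -> list[int]:
--     return sorted(lst, key=lambda n: (n > 0) - (n < 0))
-- ===== Notes on version B (the rewrite author's own statement) =====
-- stated objective: idiomatic
-- what changed: Replaces the three-bucket append loop with a single stable sort keyed by the sign (n>0)-(n<0), letting sort stability preserve the original order within each sign group.
import Mathlib
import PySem

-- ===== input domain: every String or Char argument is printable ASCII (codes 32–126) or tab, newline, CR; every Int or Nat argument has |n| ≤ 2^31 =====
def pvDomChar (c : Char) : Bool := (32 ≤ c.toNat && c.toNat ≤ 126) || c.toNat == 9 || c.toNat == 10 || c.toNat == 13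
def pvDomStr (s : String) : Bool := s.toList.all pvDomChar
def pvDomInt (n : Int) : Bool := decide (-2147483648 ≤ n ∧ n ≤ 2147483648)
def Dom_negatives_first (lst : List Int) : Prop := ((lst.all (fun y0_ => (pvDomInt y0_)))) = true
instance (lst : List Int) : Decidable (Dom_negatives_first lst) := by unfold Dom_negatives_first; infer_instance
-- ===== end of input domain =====

-- B replaces A's three-bucket append loop with one stable sort keyed by the sign of each element (idiomatic; not faster).

-- ===== PORT A =====
-- the loop over lst appending n to negatives / zeros / positives, then negatives + zeros + positives
def negatives_first (lst : List Int) : List Int :=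
  let st := lst.foldl
    (fun (acc : List Int × List Int × List Int) n =>
      if n < 0 then (acc.1 ++ [n], acc.2.1, acc.2.2)
      else if n = 0 then (acc.1, acc.2.1 ++ [n], acc.2.2)
      else (acc.1, acc.2.1, acc.2.2 ++ [n]))
    ([], [], [])
  st.1 ++ st.2.1 ++ st.2.2

-- ===== PORT B =====
-- sorted(lst, key=lambda n: (n > 0) - (n < 0))
def negatives_first_alt (lst : List Int) : List Int :=
  PySem.List.sorted lst (fun n => (if 0 < n then (1 : Int) else 0) - (if n < 0 then 1 else 0)) false

-- ===== PRECONDITION & SPEC =====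
def Spec_negatives_first (lst : List Int) (out : List Int) : Prop := out = negatives_first_alt lst
instance (lst : List Int) (out : List Int) : Decidable (Spec_negatives_first lst out) := by unfold Spec_negatives_first; infer_instance

-- ===== CLAIM (what is proved, stated in full; the proofs are below) =====
def Claim_equal_negatives_first : Prop := ∀ (lst : List Int), Dom_negatives_first lst → Spec_negatives_first lst (negatives_first lst)

-- ===== LEMMAS AND PROOFS =====

-- the sign key used by B
def pvSignKey (n : Int) : Int := (if 0 < n then (1 : Int) else 0) - (if n < 0 then 1 else 0)

-- unfolding equations for PySem.List.insertBy
lemma insertBy_nil {a : Type} (before : a -> a -> Bool) (x : a) :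
    PySem.List.insertBy before x [] = [x] := rfl

lemma insertBy_cons {a : Type} (before : a -> a -> Bool) (x y : a) (ys : List a) :
    PySem.List.insertBy before x (y :: ys) =
      if before x y then x :: y :: ys else y :: PySem.List.insertBy before x ys := rfl

-- one insertion step of B's stable insertion sort on a partitioned list lands in its sign bucket
lemma insertBy_partitioned (N Z P : List Int)
    (hN : forall a, a ∈ N -> a < 0) (hZ : forall a, a ∈ Z -> a = 0) (hP : forall a, a ∈ P -> 0 < a) (x : Int) :
    PySem.List.insertBy (fun a b => decide (pvSignKey a < pvSignKey b)) x (N ++ Z ++ P) =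
      if x < 0 then (N ++ [x]) ++ Z ++ P
      else if x = 0 then N ++ (Z ++ [x]) ++ P
      else N ++ Z ++ (P ++ [x]) := by
  induction N with
  | nil =>
    induction Z with
    | nil =>
      induction P with
      | nil => simp [insertBy_nil]
      | cons p ps ihP =>
        have hp : 0 < p := hP p (by simp)
        simp only [List.nil_append] at ihP ⊢
        by_cases hx : 0 < x
        · have hkey : ¬ pvSignKey x < pvSignKey p := by
            simp only [pvSignKey]; split_ifs <;> omega
          rw [insertBy_cons, if_neg (by simp [hkey])]
          rw [ihP (fun a ha => hP a (by simp [ha]))]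
          have h1 : ¬ x < 0 := by omega
          have h2 : ¬ x = 0 := by omega
          simp [h1, h2]
        · have hkey : pvSignKey x < pvSignKey p := by
            simp only [pvSignKey]; split_ifs <;> omega
          rw [insertBy_cons, if_pos (by simp [hkey])]
          by_cases h1 : x < 0
          · simp [h1]
          · have h2 : x = 0 := by omega
            simp [h2]
    | cons z zs ihZ =>
      have hz : z = 0 := hZ z (by simp)
      simp only [List.nil_append, List.cons_append] at ihZ ⊢
      by_cases h1 : x < 0
      · have hkey : pvSignKey x < pvSignKey z := by
          simp only [pvSignKey, hz]; split_ifs <;> omega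
        rw [insertBy_cons, if_pos (by simp [hkey])]
        simp [h1]
      · have hkey : ¬ pvSignKey x < pvSignKey z := by
          simp only [pvSignKey, hz]; split_ifs <;> omega
        rw [insertBy_cons, if_neg (by simp [hkey])]
        rw [ihZ (fun a ha => hZ a (by simp [ha]))]
        by_cases h2 : x = 0 <;> simp [h1, h2]
  | cons m ms ihN =>
    have hm : m < 0 := hN m (by simp)
    have hkey : ¬ pvSignKey x < pvSignKey m := by
      simp only [pvSignKey]; split_ifs <;> omega
    simp only [List.cons_append] at ihN ⊢
    rw [insertBy_cons, if_neg (by simp [hkey])]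
    rw [ihN (fun a ha => hN a (by simp [ha]))]
    split_ifs <;> simp

-- B's whole fold, from a partitioned accumulator, appends each sign's filter to its bucket
lemma alt_loop (lst N Z P : List Int)
    (hN : ∀ a ∈ N, a < 0) (hZ : ∀ a ∈ Z, a = 0) (hP : ∀ a ∈ P, 0 < a) :
    lst.foldl (fun acc x => PySem.List.insertBy (fun a b => decide (pvSignKey a < pvSignKey b)) x acc)
        (N ++ Z ++ P) =
      (N ++ lst.filter (fun n => decide (n < 0))) ++
      (Z ++ lst.filter (fun n => decide (n = 0))) ++
      (P ++ lst.filter (fun n => decide (0 < n))) := by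
  induction lst generalizing N Z P with
  | nil => simp
  | cons x xs ih =>
    simp only [List.foldl_cons]
    rw [insertBy_partitioned N Z P (fun a ha => hN a ha) (fun a ha => hZ a ha) (fun a ha => hP a ha) x]
    by_cases h1 : x < 0
    · rw [if_pos h1, ih (N ++ [x]) Z P
        (by intro a ha; rcases List.mem_append.1 ha with h | h
            · exact hN a h
            · simp at h; omega) hZ hP]
      have h2 : ¬ x = 0 := by omega
      have h3 : ¬ 0 < x := by omega
      simp [h1, h2, h3]
    · by_cases h2 : x = 0
      · rw [if_neg h1, if_pos h2, ih N (Z ++ [x]) P hN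
          (by intro a ha; rcases List.mem_append.1 ha with h | h
              · exact hZ a h
              · simp at h; omega) hP]
        have h3 : ¬ 0 < x := by omega
        simp [h2]
      · rw [if_neg h1, if_neg h2, ih N Z (P ++ [x]) hN hZ
          (by intro a ha; rcases List.mem_append.1 ha with h | h
              · exact hP a h
              · simp at h; omega)]
        have h3 : 0 < x := by omega
        simp [h1, h2, h3]

-- A's bucket fold computes the three filters
lemma a_loop (lst N Z P : List Int) :
    lst.foldl
      (fun (acc : List Int × List Int × List Int) n =>
        if n < 0 then (acc.1 ++ [n], acc.2.1, acc.2.2)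
        else if n = 0 then (acc.1, acc.2.1 ++ [n], acc.2.2)
        else (acc.1, acc.2.1, acc.2.2 ++ [n]))
      (N, Z, P) =
      (N ++ lst.filter (fun n => decide (n < 0)),
       Z ++ lst.filter (fun n => decide (n = 0)),
       P ++ lst.filter (fun n => decide (0 < n))) := by
  induction lst generalizing N Z P with
  | nil => simp
  | cons x xs ih =>
    simp only [List.foldl_cons]
    by_cases h1 : x < 0
    · have h2 : ¬ x = 0 := by omega
      have h3 : ¬ 0 < x := by omega
      rw [if_pos h1]; rw [ih]
      simp [h1, h2, h3]
    · by_cases h2 : x = 0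
      · have h3 : ¬ 0 < x := by omega
        rw [if_neg h1, if_pos h2]; rw [ih]
        simp [h2]
      · have h3 : 0 < x := by omega
        rw [if_neg h1, if_neg h2]; rw [ih]
        simp [h1, h2, h3]

-- ===== VERDICT (by name: the statement is the Claim_ definition above) =====
theorem negatives_first_spec : Claim_equal_negatives_first := by
  intro lst _
  unfold Spec_negatives_first negatives_first negatives_first_alt
  rw [PySem.List.sorted_eq_foldl_insertBy]
  have hB := alt_loop lst [] [] [] (by simp) (by simp) (by simp)
  simp only [List.nil_append] at hB
  have hA := a_loop lst [] [] []
  simp only [List.nil_append] at hA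
  rw [hA]
  exact hB.symm
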